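-- pv_equiv track=rewrite | github.com/jake-albert/py-algs | c17/c17p23.py | get_memo
-- ===== SOURCE A (Python) =====
-- BLACK = 1
--
-- def get_memo(M,N):
--     """Returns a memo that stores two values for every position (r,c)
--     in a square matrix M of dimension n:
--
--         A) The number of black pixels in the longest uninterrupted
--         sequence starting at (r,c) and extending to the right; and
--         B) The same, but for a sequence extending down.
--
--     Args:
--         M: A list of lists of ints 0 or 1.
--         N: The dimension of the matrix.
--
--     Returns:
--         A list of lists of ints with values from 0 to n inclusive.
--     """
--
--     # Python for loops are relatively slow, so it would be wise to
--     # re-write using NumPy in any situation where speed really matters.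
--
--     memo = [[[0,0] for _ in range(N)] for _ in range(N)]
--
--     for r in range(N-1,-1,-1):
--         for c in range(N-1,-1,-1):
--             if M[r][c] == BLACK:
--                 memo[r][c][0] = memo[r][c+1][0] + 1 if c < N-1 else 1
--                 memo[r][c][1] = memo[r+1][c][1] + 1 if r < N-1 else 1
--
--     return memo
-- ===== SOURCE B (Python) =====
-- BLACK = 1
--
-- def get_memo(M, N):
--     """Two independent passes with a threaded run-length accumulator:
--     pass 1 fills the rightward runs row by row, pass 2 the downward runs
--     column by column; no memo entry is ever read back."""
--     memo = [[[0, 0] for _ in range(N)] for _ in range(N)]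
--     for r in range(N):
--         run = 0
--         for c in range(N - 1, -1, -1):
--             run = run + 1 if M[r][c] == BLACK else 0
--             memo[r][c][0] = run
--     for c in range(N):
--         run = 0
--         for r in range(N - 1, -1, -1):
--             run = run + 1 if M[r][c] == BLACK else 0
--             memo[r][c][1] = run
--     return memo
-- ===== Notes on version B (the rewrite author's own statement) =====
-- stated objective: alternative
-- what changed: Replaces A's single combined backward double loop, which reads neighbouring memo entries (memo[r][c+1], memo[r+1][c]) and writes only black cells, with two independent passes (rows for the rightward runs, then columns for the downward runs) each threading a running run-length accumulator, so no memo entry is ever read back and every cell is written.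
import Mathlib
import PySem

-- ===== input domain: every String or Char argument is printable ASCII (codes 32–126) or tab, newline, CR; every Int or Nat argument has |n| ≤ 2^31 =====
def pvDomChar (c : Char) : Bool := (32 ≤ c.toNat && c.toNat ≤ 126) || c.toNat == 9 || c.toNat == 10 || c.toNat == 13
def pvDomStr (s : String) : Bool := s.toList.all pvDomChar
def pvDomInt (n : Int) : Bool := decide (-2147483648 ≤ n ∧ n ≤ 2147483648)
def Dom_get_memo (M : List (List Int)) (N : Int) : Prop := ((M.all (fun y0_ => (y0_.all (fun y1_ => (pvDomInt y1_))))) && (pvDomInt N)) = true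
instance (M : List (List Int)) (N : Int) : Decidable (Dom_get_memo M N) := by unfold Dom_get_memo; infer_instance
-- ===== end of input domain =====

-- B replaces A's combined backward loop (which reads neighbouring memo entries and writes
-- only black cells) by two independent row/column passes threading a running run-length
-- accumulator; a genuinely different decomposition at the same O(N^2) cost ("alternative").

-- shared helpers: the reads M[r][c] and memo[r][c][k], and the mutation memo[r][c][k] = v
-- (exact under Pre_, where every index is in range)
def pvGetM (M : List (List Int)) (r c : Int) : Int :=
  PySem.List.pyGetD (PySem.List.pyGetD M r []) c 0

def pvMget (memo : List (List (List Int))) (r c k : Int) : Int :=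
  PySem.List.pyGetD (PySem.List.pyGetD (PySem.List.pyGetD memo r []) c []) k 0

def pvMset (memo : List (List (List Int))) (r c k : Int) (v : Int) : List (List (List Int)) :=
  let row := PySem.List.pyGetD memo r []
  let cell := PySem.List.pyGetD row c []
  PySem.List.pySetD memo r (PySem.List.pySetD row c (PySem.List.pySetD cell k v))

-- memo = [[[0,0] for _ in range(N)] for _ in range(N)]  (identical line in both Pythons)
def pvInit (N : Int) : List (List (List Int)) :=
  (PySem.List.pyRange 0 N 1).map (fun _ => (PySem.List.pyRange 0 N 1).map (fun _ => ([0, 0] : List Int)))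

-- ===== PORT A =====
def get_memo (M : List (List Int)) (N : Int) : List (List (List Int)) :=
  (PySem.List.pyRange (N - 1) (-1) (-1)).foldl (fun memo r =>
    (PySem.List.pyRange (N - 1) (-1) (-1)).foldl (fun memo c =>
      if pvGetM M r c == 1 then
        let memo := pvMset memo r c 0 (if c < N - 1 then pvMget memo r (c + 1) 0 + 1 else 1)
        pvMset memo r c 1 (if r < N - 1 then pvMget memo (r + 1) c 1 + 1 else 1)
      else memo) memo) (pvInit N)

-- ===== PORT B =====
def get_memo_alt (M : List (List Int)) (N : Int) : List (List (List Int)) :=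
  let memo1 := (PySem.List.pyRange 0 N 1).foldl (fun memo r =>
    ((PySem.List.pyRange (N - 1) (-1) (-1)).foldl (fun st c =>
      let run := if pvGetM M r c == 1 then st.2 + 1 else 0
      (pvMset st.1 r c 0 run, run)) (memo, (0 : Int))).1) (pvInit N)
  (PySem.List.pyRange 0 N 1).foldl (fun memo c =>
    ((PySem.List.pyRange (N - 1) (-1) (-1)).foldl (fun st r =>
      let run := if pvGetM M r c == 1 then st.2 + 1 else 0
      (pvMset st.1 r c 1 run, run)) (memo, (0 : Int))).1) memo1

-- ===== PRECONDITION & SPEC =====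
-- Pre_: exactly the inputs on which Python A returns. A indexes M[r][c] for every
-- 0 <= r,c < N, so it raises IndexError iff M has fewer than N rows or one of the
-- first N rows has fewer than N entries; for N <= 0 no access happens.
def Pre_get_memo (M : List (List Int)) (N : Int) : Prop :=
  N ≤ (M.length : Int) ∧ ∀ row ∈ M.take N.toNat, N ≤ (row.length : Int)
instance (M : List (List Int)) (N : Int) : Decidable (Pre_get_memo M N) := by
  unfold Pre_get_memo; infer_instance

def pvWitness_get_memo : List (List Int) × Int := ([[1, 0], [1, 1]], 2)

def Spec_get_memo (M : List (List Int)) (N : Int) (out : List (List (List Int))) : Prop := out = get_memo_alt M N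
instance (M : List (List Int)) (N : Int) (out : List (List (List Int))) : Decidable (Spec_get_memo M N out) := by unfold Spec_get_memo; infer_instance

-- ===== CLAIM (what is proved, stated in full; the proofs are below) =====
def Claim_equal_get_memo : Prop := ∀ (M : List (List Int)) (N : Int), Dom_get_memo M N → Pre_get_memo M N → Spec_get_memo M N (get_memo M N)

-- ===== LEMMAS AND PROOFS =====
-- Both ports are shown equal to the same closed table: entry (r,c) holds the
-- rightward run length rv and the downward run length dv of black pixels.

def rv (M : List (List Int)) (N r c : Int) : Int :=
  if h : c < N then (if pvGetM M r c == 1 then rv M N r (c + 1) + 1 else 0) else 0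
termination_by (N - c).toNat
decreasing_by omega

def dv (M : List (List Int)) (N r c : Int) : Int :=
  if h : r < N then (if pvGetM M r c == 1 then dv M N (r + 1) c + 1 else 0) else 0
termination_by (N - r).toNat
decreasing_by omega

lemma rv_step (M : List (List Int)) (N r c : Int) (h : c < N) :
    rv M N r c = if pvGetM M r c == 1 then rv M N r (c + 1) + 1 else 0 := by
  rw [rv, dif_pos h]

lemma rv_stop (M : List (List Int)) (N r c : Int) (h : N ≤ c) : rv M N r c = 0 := by
  rw [rv, dif_neg (by omega)]

lemma dv_step (M : List (List Int)) (N r c : Int) (h : r < N) :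
    dv M N r c = if pvGetM M r c == 1 then dv M N (r + 1) c + 1 else 0 := by
  rw [dv, dif_pos h]

lemma dv_stop (M : List (List Int)) (N r c : Int) (h : N ≤ r) : dv M N r c = 0 := by
  rw [dv, dif_neg (by omega)]

def tabN (n : Nat) (f g : Int → Int → Int) : List (List (List Int)) :=
  (List.range n).map (fun (r : Nat) => (List.range n).map (fun (c : Nat) => [f ((r : Nat) : Int) ((c : Nat) : Int), g ((r : Nat) : Int) ((c : Nat) : Int)]))

lemma tabN_congr {n : Nat} {f g f' g' : Int → Int → Int}
    (h : ∀ r c : Nat, r < n → c < n → f r c = f' r c ∧ g r c = g' r c) :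
    tabN n f g = tabN n f' g' := by
  unfold tabN
  apply List.map_congr_left
  intro i hi
  apply List.map_congr_left
  intro j hj
  simp only [List.mem_range] at hi hj
  rw [(h i j hi hj).1, (h i j hi hj).2]

lemma set_map_range {α : Type} (n : Nat) (h : Nat → α) (r : Nat) (_hr : r < n) (x : α) :
    ((List.range n).map h).set r x = (List.range n).map (fun i => if i = r then x else h i) := by
  apply List.ext_getElem
  · simp
  · intro i h1 h2
    simp only [List.getElem_set, List.getElem_map, List.getElem_range]
    simp only [List.length_set, List.length_map, List.length_range] at h1
    split
    · simp_all
    · rw [if_neg (by omega)]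

lemma getD_tab (n : Nat) (f g : Int → Int → Int) (r : Int)
    (hr : 0 ≤ r ∧ r < (n : Int)) :
    PySem.List.pyGetD (tabN n f g) r []
      = (List.range n).map (fun (c : Nat) => [f r (c : Int), g r (c : Int)]) := by
  have h1 : r.toNat < n := by omega
  rw [tabN, PySem.List.pyGetD_eq_getElem _ _ hr.1 (by simp; omega)]
  simp only [List.getElem_map, List.getElem_range]
  have : ((r.toNat : Nat) : Int) = r := by omega
  rw [this]

lemma mget_tab0 (n : Nat) (f g : Int → Int → Int) (r c : Int)
    (hr : 0 ≤ r ∧ r < (n : Int)) (hc : 0 ≤ c ∧ c < (n : Int)) :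
    pvMget (tabN n f g) r c 0 = f r c := by
  rw [pvMget, getD_tab n f g r hr,
     PySem.List.pyGetD_eq_getElem _ _ hc.1 (by simp; omega)]
  simp only [List.getElem_map, List.getElem_range]
  have : ((c.toNat : Nat) : Int) = c := by omega
  rw [this]
  rfl

lemma mget_tab1 (n : Nat) (f g : Int → Int → Int) (r c : Int)
    (hr : 0 ≤ r ∧ r < (n : Int)) (hc : 0 ≤ c ∧ c < (n : Int)) :
    pvMget (tabN n f g) r c 1 = g r c := by
  rw [pvMget, getD_tab n f g r hr,
     PySem.List.pyGetD_eq_getElem _ _ hc.1 (by simp; omega)]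
  simp only [List.getElem_map, List.getElem_range]
  have : ((c.toNat : Nat) : Int) = c := by omega
  rw [this]
  rfl

lemma mset_tab0 (n : Nat) (f g : Int → Int → Int) (r c : Int) (v : Int)
    (hr : 0 ≤ r ∧ r < (n : Int)) (hc : 0 ≤ c ∧ c < (n : Int)) :
    pvMset (tabN n f g) r c 0 v
      = tabN n (fun r' c' => if r' = r ∧ c' = c then v else f r' c') g := by
  rw [pvMset, getD_tab n f g r hr,
     PySem.List.pyGetD_eq_getElem _ _ hc.1 (by simp; omega)]
  simp only [List.getElem_map, List.getElem_range]
  have hcc : ((c.toNat : Nat) : Int) = c := by omega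
  rw [hcc]
  show PySem.List.pySetD (tabN n f g) r
      (PySem.List.pySetD ((List.range n).map fun (c' : Nat) => [f r c', g r c']) c
        (PySem.List.pySetD [f r c, g r c] 0 v)) = _
  rw [show PySem.List.pySetD [f r c, g r c] (0:Int) v = [v, g r c] from rfl]
  rw [PySem.List.pySetD_of_nonneg _ _ hc.1, PySem.List.pySetD_of_nonneg _ _ hr.1]
  rw [set_map_range n _ c.toNat (by omega)]
  rw [tabN, set_map_range n _ r.toNat (by omega)]
  apply List.map_congr_left
  intro i hi
  simp only [List.mem_range] at hi
  by_cases hir : i = r.toNat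
  · rw [if_pos hir]
    apply List.map_congr_left
    intro j hj
    simp only [List.mem_range] at hj
    by_cases hjc : j = c.toNat
    · rw [if_pos hjc]
      have h1 : ((i : Nat) : Int) = r := by omega
      have h2 : ((j : Nat) : Int) = c := by omega
      show [v, g r c] = [if (i : Int) = r ∧ (j : Int) = c then v else f i j, g (i : Int) (j : Int)]
      rw [if_pos ⟨h1, h2⟩, h1, h2]
    · rw [if_neg hjc]
      have h1 : ((i : Nat) : Int) = r := by omega
      show [f r (j : Int), g r (j : Int)]
          = [if (i : Int) = r ∧ (j : Int) = c then v else f i j, g (i : Int) (j : Int)]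
      rw [if_neg (by rintro ⟨-, h2⟩; omega), h1]
  · rw [if_neg hir]
    apply List.map_congr_left
    intro j hj
    show [f (i : Int) (j : Int), g (i : Int) (j : Int)]
        = [if (i : Int) = r ∧ (j : Int) = c then v else f i j, g (i : Int) (j : Int)]
    rw [if_neg (by rintro ⟨h1, -⟩; omega)]

lemma mset_tab1 (n : Nat) (f g : Int → Int → Int) (r c : Int) (v : Int)
    (hr : 0 ≤ r ∧ r < (n : Int)) (hc : 0 ≤ c ∧ c < (n : Int)) :
    pvMset (tabN n f g) r c 1 v
      = tabN n f (fun r' c' => if r' = r ∧ c' = c then v else g r' c') := by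
  rw [pvMset, getD_tab n f g r hr,
     PySem.List.pyGetD_eq_getElem _ _ hc.1 (by simp; omega)]
  simp only [List.getElem_map, List.getElem_range]
  have hcc : ((c.toNat : Nat) : Int) = c := by omega
  rw [hcc]
  show PySem.List.pySetD (tabN n f g) r
      (PySem.List.pySetD ((List.range n).map fun (c' : Nat) => [f r c', g r c']) c
        (PySem.List.pySetD [f r c, g r c] 1 v)) = _
  rw [show PySem.List.pySetD [f r c, g r c] (1:Int) v = [f r c, v] from rfl]
  rw [PySem.List.pySetD_of_nonneg _ _ hc.1, PySem.List.pySetD_of_nonneg _ _ hr.1]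
  rw [set_map_range n _ c.toNat (by omega)]
  rw [tabN, set_map_range n _ r.toNat (by omega)]
  apply List.map_congr_left
  intro i hi
  simp only [List.mem_range] at hi
  by_cases hir : i = r.toNat
  · rw [if_pos hir]
    apply List.map_congr_left
    intro j hj
    simp only [List.mem_range] at hj
    by_cases hjc : j = c.toNat
    · rw [if_pos hjc]
      have h1 : ((i : Nat) : Int) = r := by omega
      have h2 : ((j : Nat) : Int) = c := by omega
      show [f r c, v] = [f (i : Int) (j : Int), if (i : Int) = r ∧ (j : Int) = c then v else g i j]
      rw [if_pos ⟨h1, h2⟩, h1, h2]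
    · rw [if_neg hjc]
      have h1 : ((i : Nat) : Int) = r := by omega
      show [f r (j : Int), g r (j : Int)]
          = [f (i : Int) (j : Int), if (i : Int) = r ∧ (j : Int) = c then v else g i j]
      rw [if_neg (by rintro ⟨-, h2⟩; omega), h1]
  · rw [if_neg hir]
    apply List.map_congr_left
    intro j hj
    show [f (i : Int) (j : Int), g (i : Int) (j : Int)]
        = [f (i : Int) (j : Int), if (i : Int) = r ∧ (j : Int) = c then v else g i j]
    rw [if_neg (by rintro ⟨h1, -⟩; omega)]

lemma pvInit_eq (N : Int) : pvInit N = tabN N.toNat (fun _ _ => 0) (fun _ _ => 0) := by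
  unfold pvInit tabN
  rw [PySem.List.pyRange_one]
  have h : (N - 0).toNat = N.toNat := by omega
  rw [h, List.map_map, List.map_map]
  rfl

def fA (M : List (List Int)) (N r j : Int) : Int → Int → Int :=
  fun r' c' => if r < r' ∨ (r' = r ∧ j ≤ c') then rv M N r' c' else 0

def gA (M : List (List Int)) (N r j : Int) : Int → Int → Int :=
  fun r' c' => if r < r' ∨ (r' = r ∧ j ≤ c') then dv M N r' c' else 0

lemma stepA (M : List (List Int)) (N r k : Int) (hr : 0 ≤ r ∧ r < N) (hk : 0 ≤ k ∧ k < N) :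
    (fun memo c =>
      if pvGetM M r c == 1 then
        let memo := pvMset memo r c 0 (if c < N - 1 then pvMget memo r (c + 1) 0 + 1 else 1)
        pvMset memo r c 1 (if r < N - 1 then pvMget memo (r + 1) c 1 + 1 else 1)
      else memo)
      (tabN N.toNat (fA M N r (k + 1)) (gA M N r (k + 1))) k
    = tabN N.toNat (fA M N r k) (gA M N r k) := by
  have hrB : 0 ≤ r ∧ r < ((N.toNat : Nat) : Int) := by omega
  have hkB : 0 ≤ k ∧ k < ((N.toNat : Nat) : Int) := by omega
  by_cases hpix : (pvGetM M r k == 1) = true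
  · simp only [hpix, if_true]
    have hv0 : (if k < N - 1 then pvMget (tabN N.toNat (fA M N r (k + 1)) (gA M N r (k + 1))) r (k + 1) 0 + 1 else 1)
        = rv M N r k := by
      by_cases hk1 : k < N - 1
      · rw [if_pos hk1, mget_tab0 N.toNat _ _ r (k + 1) hrB (by omega)]
        rw [rv_step M N r k hk.2, if_pos hpix]
        unfold fA
        rw [if_pos (Or.inr ⟨rfl, le_refl _⟩)]
      · rw [if_neg hk1, rv_step M N r k hk.2, if_pos hpix, rv_stop M N r (k + 1) (by omega)]
        omega
    rw [hv0, mset_tab0 N.toNat _ _ r k _ hrB hkB]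
    have hv1 : (if r < N - 1 then
          pvMget (tabN N.toNat (fun r' c' => if r' = r ∧ c' = k then rv M N r k else fA M N r (k + 1) r' c') (gA M N r (k + 1))) (r + 1) k 1 + 1
        else 1) = dv M N r k := by
      by_cases hr1 : r < N - 1
      · rw [if_pos hr1, mget_tab1 N.toNat _ _ (r + 1) k (by omega) hkB]
        rw [dv_step M N r k hr.2, if_pos hpix]
        unfold gA
        rw [if_pos (Or.inl (by omega))]
      · rw [if_neg hr1, dv_step M N r k hr.2, if_pos hpix, dv_stop M N (r + 1) k (by omega)]
        omega
    rw [hv1, mset_tab1 N.toNat _ _ r k _ hrB hkB]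
    apply tabN_congr
    intro i j hi hj
    constructor
    · show (if (i : Int) = r ∧ (j : Int) = k then rv M N r k else fA M N r (k + 1) i j) = fA M N r k i j
      unfold fA
      by_cases h1 : (i : Int) = r ∧ (j : Int) = k
      · rw [if_pos h1, if_pos (Or.inr ⟨h1.1, by omega⟩), h1.1, h1.2]
      · rw [if_neg h1]
        split_ifs with h2 h3 <;> first | rfl | omega
    · show (if (i : Int) = r ∧ (j : Int) = k then dv M N r k else gA M N r (k + 1) i j) = gA M N r k i j
      unfold gA
      by_cases h1 : (i : Int) = r ∧ (j : Int) = k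
      · rw [if_pos h1, if_pos (Or.inr ⟨h1.1, by omega⟩), h1.1, h1.2]
      · rw [if_neg h1]
        split_ifs with h2 h3 <;> first | rfl | omega
  · simp only [hpix]
    apply tabN_congr
    intro i j hi hj
    have hz : rv M N r k = 0 := by rw [rv_step M N r k hk.2, if_neg hpix]
    have hz' : dv M N r k = 0 := by rw [dv_step M N r k hr.2, if_neg hpix]
    constructor
    · unfold fA
      by_cases h1 : (i : Int) = r ∧ (j : Int) = k
      · rw [if_neg (by omega), if_pos (Or.inr ⟨h1.1, by omega⟩), h1.1, h1.2, hz]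
      · split_ifs with h2 h3 <;> first | rfl | omega
    · unfold gA
      by_cases h1 : (i : Int) = r ∧ (j : Int) = k
      · rw [if_neg (by omega), if_pos (Or.inr ⟨h1.1, by omega⟩), h1.1, h1.2, hz']
      · split_ifs with h2 h3 <;> first | rfl | omega

lemma innerA (M : List (List Int)) (N r : Int) (hr : 0 ≤ r ∧ r < N) :
    ∀ (m : Nat) (k : Int), k < N → (k + 1).toNat = m →
    (PySem.List.pyRange k (-1) (-1)).foldl
      (fun memo c =>
        if pvGetM M r c == 1 then
          let memo := pvMset memo r c 0 (if c < N - 1 then pvMget memo r (c + 1) 0 + 1 else 1)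
          pvMset memo r c 1 (if r < N - 1 then pvMget memo (r + 1) c 1 + 1 else 1)
        else memo)
      (tabN N.toNat (fA M N r (k + 1)) (gA M N r (k + 1)))
    = tabN N.toNat (fA M N r 0) (gA M N r 0) := by
  intro m
  induction m with
  | zero =>
    intro k hkN hm
    rw [PySem.List.pyRange_neg_one_eq_nil (by omega)]
    simp only [List.foldl_nil]
    apply tabN_congr
    intro i j hi hj
    constructor
    · unfold fA
      split_ifs with h2 h3 <;> first | rfl | omega
    · unfold gA
      split_ifs with h2 h3 <;> first | rfl | omega
  | succ m ih =>
    intro k hkN hm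
    rw [PySem.List.pyRange_neg_one_cons (by omega : (-1 : Int) < k), List.foldl_cons]
    refine Eq.trans (congrArg (fun s => List.foldl _ s (PySem.List.pyRange (k - 1) (-1) (-1)))
      (stepA M N r k hr ⟨by omega, hkN⟩)) ?_
    have hk1 : k - 1 + 1 = k := by omega
    rw [show tabN N.toNat (fA M N r k) (gA M N r k)
          = tabN N.toNat (fA M N r (k - 1 + 1)) (gA M N r (k - 1 + 1)) by rw [hk1]]
    exact ih (k - 1) (by omega) (by omega)

def fR (M : List (List Int)) (N j : Int) : Int → Int → Int :=
  fun r' c' => if j ≤ r' then rv M N r' c' else 0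

def gR (M : List (List Int)) (N j : Int) : Int → Int → Int :=
  fun r' c' => if j ≤ r' then dv M N r' c' else 0

lemma outerA (M : List (List Int)) (N : Int) :
    ∀ (m : Nat) (k : Int), k < N → (k + 1).toNat = m →
    (PySem.List.pyRange k (-1) (-1)).foldl
      (fun memo r =>
        (PySem.List.pyRange (N - 1) (-1) (-1)).foldl
          (fun memo c =>
            if pvGetM M r c == 1 then
              let memo := pvMset memo r c 0 (if c < N - 1 then pvMget memo r (c + 1) 0 + 1 else 1)
              pvMset memo r c 1 (if r < N - 1 then pvMget memo (r + 1) c 1 + 1 else 1)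
            else memo) memo)
      (tabN N.toNat (fR M N (k + 1)) (gR M N (k + 1)))
    = tabN N.toNat (fR M N 0) (gR M N 0) := by
  intro m
  induction m with
  | zero =>
    intro k hkN hm
    rw [PySem.List.pyRange_neg_one_eq_nil (show k ≤ (-1 : Int) by omega)]
    simp only [List.foldl_nil]
    apply tabN_congr
    intro i j hi hj
    constructor
    · unfold fR
      split_ifs with h2 h3 <;> first | rfl | omega
    · unfold gR
      split_ifs with h2 h3 <;> first | rfl | omega
  | succ m ih =>
    intro k hkN hm
    rw [PySem.List.pyRange_neg_one_cons (by omega : (-1 : Int) < k)]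
    rw [List.foldl_cons]
    have hst : tabN N.toNat (fR M N (k + 1)) (gR M N (k + 1))
        = tabN N.toNat (fA M N k ((N - 1) + 1)) (gA M N k ((N - 1) + 1)) := by
      apply tabN_congr
      intro i j hi hj
      constructor
      · unfold fR fA
        split_ifs with h2 h3 <;> first | rfl | omega
      · unfold gR gA
        split_ifs with h2 h3 <;> first | rfl | omega
    rw [hst, innerA M N k ⟨by omega, hkN⟩ N.toNat (N - 1) (by omega) (by omega)]
    have hst2 : tabN N.toNat (fA M N k 0) (gA M N k 0)
        = tabN N.toNat (fR M N (k - 1 + 1)) (gR M N (k - 1 + 1)) := by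
      apply tabN_congr
      intro i j hi hj
      constructor
      · unfold fR fA
        split_ifs with h2 h3 <;> first | rfl | omega
      · unfold gR gA
        split_ifs with h2 h3 <;> first | rfl | omega
    rw [hst2]
    exact ih (k - 1) (by omega) (by omega)

lemma A_eq_tab (M : List (List Int)) (N : Int) (hN : 0 < N) :
    get_memo M N = tabN N.toNat (rv M N) (dv M N) := by
  unfold get_memo
  have hinit : pvInit N = tabN N.toNat (fR M N ((N - 1) + 1)) (gR M N ((N - 1) + 1)) := by
    rw [pvInit_eq]
    apply tabN_congr
    intro i j hi hj
    constructor
    · unfold fR; split_ifs <;> first | rfl | omega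
    · unfold gR; split_ifs <;> first | rfl | omega
  rw [hinit, outerA M N N.toNat (N - 1) (by omega) (by omega)]
  apply tabN_congr
  intro i j hi hj
  constructor
  · unfold fR; split_ifs <;> first | rfl | omega
  · unfold gR; split_ifs <;> first | rfl | omega

def fB (M : List (List Int)) (N r j : Int) : Int → Int → Int :=
  fun r' c' => if r' < r ∨ (r' = r ∧ j ≤ c') then rv M N r' c' else 0

lemma stepB1 (M : List (List Int)) (N r k : Int) (g : Int → Int → Int)
    (hr : 0 ≤ r ∧ r < N) (hk : 0 ≤ k ∧ k < N) :
    (fun (st : List (List (List Int)) × Int) c =>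
      let run := if pvGetM M r c == 1 then st.2 + 1 else 0
      (pvMset st.1 r c 0 run, run))
      (tabN N.toNat (fB M N r (k + 1)) g, rv M N r (k + 1)) k
    = (tabN N.toNat (fB M N r k) g, rv M N r k) := by
  have hrB : 0 ≤ r ∧ r < ((N.toNat : Nat) : Int) := by omega
  have hkB : 0 ≤ k ∧ k < ((N.toNat : Nat) : Int) := by omega
  have hrun : (if pvGetM M r k == 1 then rv M N r (k + 1) + 1 else 0) = rv M N r k :=
    (rv_step M N r k hk.2).symm
  show (pvMset (tabN N.toNat (fB M N r (k + 1)) g) r k 0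
          (if pvGetM M r k == 1 then rv M N r (k + 1) + 1 else 0),
        (if pvGetM M r k == 1 then rv M N r (k + 1) + 1 else 0))
      = (tabN N.toNat (fB M N r k) g, rv M N r k)
  rw [hrun, mset_tab0 N.toNat _ _ r k _ hrB hkB]
  refine congrArg (fun t => (t, rv M N r k)) ?_
  apply tabN_congr
  intro i j hi hj
  refine ⟨?_, rfl⟩
  show (if (i : Int) = r ∧ (j : Int) = k then rv M N r k else fB M N r (k + 1) i j) = fB M N r k i j
  unfold fB
  by_cases h1 : (i : Int) = r ∧ (j : Int) = k
  · rw [if_pos h1, if_pos (Or.inr ⟨h1.1, by omega⟩), h1.1, h1.2]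
  · rw [if_neg h1]
    split_ifs with h2 h3 <;> first | rfl | omega

lemma innerB1 (M : List (List Int)) (N r : Int) (g : Int → Int → Int) (hr : 0 ≤ r ∧ r < N) :
    ∀ (m : Nat) (k : Int), -1 ≤ k → k < N → (k + 1).toNat = m →
    (PySem.List.pyRange k (-1) (-1)).foldl
      (fun (st : List (List (List Int)) × Int) c =>
        let run := if pvGetM M r c == 1 then st.2 + 1 else 0
        (pvMset st.1 r c 0 run, run))
      (tabN N.toNat (fB M N r (k + 1)) g, rv M N r (k + 1))
    = (tabN N.toNat (fB M N r 0) g, rv M N r 0) := by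
  intro m
  induction m with
  | zero =>
    intro k hk1 hkN hm
    rw [PySem.List.pyRange_neg_one_eq_nil (show k ≤ (-1 : Int) by omega)]
    simp only [List.foldl_nil]
    rw [show k + 1 = 0 by omega]
  | succ m ih =>
    intro k hk1 hkN hm
    rw [PySem.List.pyRange_neg_one_cons (show (-1 : Int) < k by omega), List.foldl_cons]
    refine Eq.trans (congrArg (fun s => List.foldl _ s (PySem.List.pyRange (k - 1) (-1) (-1)))
      (stepB1 M N r k g hr ⟨by omega, hkN⟩)) ?_
    have hk2 : k - 1 + 1 = k := by omega
    rw [show (tabN N.toNat (fB M N r k) g, rv M N r k)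
          = (tabN N.toNat (fB M N r (k - 1 + 1)) g, rv M N r (k - 1 + 1)) by rw [hk2]]
    exact ih (k - 1) (by omega) (by omega) (by omega)

def hRow (M : List (List Int)) (N a : Int) : Int → Int → Int :=
  fun r' c' => if r' < a then rv M N r' c' else 0

lemma outerB1 (M : List (List Int)) (N : Int) (g : Int → Int → Int) :
    ∀ (m : Nat) (a : Int), 0 ≤ a → a ≤ N → (N - a).toNat = m →
    (PySem.List.pyRange a N 1).foldl
      (fun memo r =>
        ((PySem.List.pyRange (N - 1) (-1) (-1)).foldl
          (fun (st : List (List (List Int)) × Int) c =>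
            let run := if pvGetM M r c == 1 then st.2 + 1 else 0
            (pvMset st.1 r c 0 run, run)) (memo, (0 : Int))).1)
      (tabN N.toNat (hRow M N a) g)
    = tabN N.toNat (hRow M N N) g := by
  intro m
  induction m with
  | zero =>
    intro a ha0 haN hm
    rw [PySem.List.pyRange_one_eq_nil (show N ≤ a by omega)]
    simp only [List.foldl_nil]
    rw [show a = N by omega]
  | succ m ih =>
    intro a ha0 haN hm
    rw [PySem.List.pyRange_one_cons (show a < N by omega), List.foldl_cons]
    have hpair : (tabN N.toNat (hRow M N a) g, (0 : Int))
        = (tabN N.toNat (fB M N a ((N - 1) + 1)) g, rv M N a ((N - 1) + 1)) := by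
      have h2 : (0 : Int) = rv M N a ((N - 1) + 1) := (rv_stop M N a ((N - 1) + 1) (by omega)).symm
      rw [← h2]
      refine congrArg (fun t => (t, (0 : Int))) ?_
      apply tabN_congr
      intro i j hi hj
      refine ⟨?_, rfl⟩
      unfold hRow fB
      split_ifs with h2 h3 <;> first | rfl | omega
    rw [hpair, innerB1 M N a g ⟨ha0, by omega⟩ N.toNat (N - 1) (by omega) (by omega) (by omega)]
    rw [show ((tabN N.toNat (fB M N a 0) g, rv M N a 0)).1 = tabN N.toNat (hRow M N (a + 1)) g by
      show tabN N.toNat (fB M N a 0) g = tabN N.toNat (hRow M N (a + 1)) g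
      apply tabN_congr
      intro i j hi hj
      refine ⟨?_, rfl⟩
      unfold hRow fB
      split_ifs with h2 h3 <;> first | rfl | omega]
    exact ih (a + 1) (by omega) (by omega) (by omega)

def gB (M : List (List Int)) (N c j : Int) : Int → Int → Int :=
  fun r' c' => if c' < c ∨ (c' = c ∧ j ≤ r') then dv M N r' c' else 0

lemma stepB2 (M : List (List Int)) (N c k : Int) (f : Int → Int → Int)
    (hc : 0 ≤ c ∧ c < N) (hk : 0 ≤ k ∧ k < N) :
    (fun (st : List (List (List Int)) × Int) r =>
      let run := if pvGetM M r c == 1 then st.2 + 1 else 0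
      (pvMset st.1 r c 1 run, run))
      (tabN N.toNat f (gB M N c (k + 1)), dv M N (k + 1) c) k
    = (tabN N.toNat f (gB M N c k), dv M N k c) := by
  have hcB : 0 ≤ c ∧ c < ((N.toNat : Nat) : Int) := by omega
  have hkB : 0 ≤ k ∧ k < ((N.toNat : Nat) : Int) := by omega
  have hrun : (if pvGetM M k c == 1 then dv M N (k + 1) c + 1 else 0) = dv M N k c :=
    (dv_step M N k c hk.2).symm
  show (pvMset (tabN N.toNat f (gB M N c (k + 1))) k c 1
          (if pvGetM M k c == 1 then dv M N (k + 1) c + 1 else 0),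
        (if pvGetM M k c == 1 then dv M N (k + 1) c + 1 else 0))
      = (tabN N.toNat f (gB M N c k), dv M N k c)
  rw [hrun, mset_tab1 N.toNat _ _ k c _ hkB hcB]
  refine congrArg (fun t => (t, dv M N k c)) ?_
  apply tabN_congr
  intro i j hi hj
  refine ⟨rfl, ?_⟩
  show (if (i : Int) = k ∧ (j : Int) = c then dv M N k c else gB M N c (k + 1) i j) = gB M N c k i j
  unfold gB
  by_cases h1 : (i : Int) = k ∧ (j : Int) = c
  · rw [if_pos h1, if_pos (Or.inr ⟨h1.2, by omega⟩), h1.1, h1.2]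
  · rw [if_neg h1]
    split_ifs with h2 h3 <;> first | rfl | omega

lemma innerB2 (M : List (List Int)) (N c : Int) (f : Int → Int → Int) (hc : 0 ≤ c ∧ c < N) :
    ∀ (m : Nat) (k : Int), -1 ≤ k → k < N → (k + 1).toNat = m →
    (PySem.List.pyRange k (-1) (-1)).foldl
      (fun (st : List (List (List Int)) × Int) r =>
        let run := if pvGetM M r c == 1 then st.2 + 1 else 0
        (pvMset st.1 r c 1 run, run))
      (tabN N.toNat f (gB M N c (k + 1)), dv M N (k + 1) c)
    = (tabN N.toNat f (gB M N c 0), dv M N 0 c) := by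
  intro m
  induction m with
  | zero =>
    intro k hk1 hkN hm
    rw [PySem.List.pyRange_neg_one_eq_nil (show k ≤ (-1 : Int) by omega)]
    simp only [List.foldl_nil]
    rw [show k + 1 = 0 by omega]
  | succ m ih =>
    intro k hk1 hkN hm
    rw [PySem.List.pyRange_neg_one_cons (show (-1 : Int) < k by omega), List.foldl_cons]
    refine Eq.trans (congrArg (fun s => List.foldl _ s (PySem.List.pyRange (k - 1) (-1) (-1)))
      (stepB2 M N c k f hc ⟨by omega, hkN⟩)) ?_
    have hk2 : k - 1 + 1 = k := by omega
    rw [show (tabN N.toNat f (gB M N c k), dv M N k c)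
          = (tabN N.toNat f (gB M N c (k - 1 + 1)), dv M N (k - 1 + 1) c) by rw [hk2]]
    exact ih (k - 1) (by omega) (by omega) (by omega)

def hCol (M : List (List Int)) (N a : Int) : Int → Int → Int :=
  fun r' c' => if c' < a then dv M N r' c' else 0

lemma outerB2 (M : List (List Int)) (N : Int) (f : Int → Int → Int) :
    ∀ (m : Nat) (a : Int), 0 ≤ a → a ≤ N → (N - a).toNat = m →
    (PySem.List.pyRange a N 1).foldl
      (fun memo c =>
        ((PySem.List.pyRange (N - 1) (-1) (-1)).foldl
          (fun (st : List (List (List Int)) × Int) r =>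
            let run := if pvGetM M r c == 1 then st.2 + 1 else 0
            (pvMset st.1 r c 1 run, run)) (memo, (0 : Int))).1)
      (tabN N.toNat f (hCol M N a))
    = tabN N.toNat f (hCol M N N) := by
  intro m
  induction m with
  | zero =>
    intro a ha0 haN hm
    rw [PySem.List.pyRange_one_eq_nil (show N ≤ a by omega)]
    simp only [List.foldl_nil]
    rw [show a = N by omega]
  | succ m ih =>
    intro a ha0 haN hm
    rw [PySem.List.pyRange_one_cons (show a < N by omega), List.foldl_cons]
    have hpair : (tabN N.toNat f (hCol M N a), (0 : Int))
        = (tabN N.toNat f (gB M N a ((N - 1) + 1)), dv M N ((N - 1) + 1) a) := by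
      have h2 : (0 : Int) = dv M N ((N - 1) + 1) a := (dv_stop M N ((N - 1) + 1) a (by omega)).symm
      rw [← h2]
      refine congrArg (fun t => (t, (0 : Int))) ?_
      apply tabN_congr
      intro i j hi hj
      refine ⟨rfl, ?_⟩
      unfold hCol gB
      split_ifs with h2 h3 <;> first | rfl | omega
    rw [hpair, innerB2 M N a f ⟨ha0, by omega⟩ N.toNat (N - 1) (by omega) (by omega) (by omega)]
    rw [show ((tabN N.toNat f (gB M N a 0), dv M N 0 a)).1 = tabN N.toNat f (hCol M N (a + 1)) by
      show tabN N.toNat f (gB M N a 0) = tabN N.toNat f (hCol M N (a + 1))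
      apply tabN_congr
      intro i j hi hj
      refine ⟨rfl, ?_⟩
      unfold hCol gB
      split_ifs with h2 h3 <;> first | rfl | omega]
    exact ih (a + 1) (by omega) (by omega) (by omega)

lemma B_eq_tab (M : List (List Int)) (N : Int) (hN : 0 < N) :
    get_memo_alt M N = tabN N.toNat (rv M N) (dv M N) := by
  unfold get_memo_alt
  have h0 : pvInit N = tabN N.toNat (hRow M N 0) (fun _ _ => 0) := by
    rw [pvInit_eq]
    apply tabN_congr
    intro i j hi hj
    refine ⟨?_, rfl⟩
    unfold hRow
    split_ifs <;> first | rfl | omega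
  rw [h0, outerB1 M N (fun _ _ => 0) N.toNat 0 le_rfl (by omega) (by omega)]
  have h1 : tabN N.toNat (hRow M N N) (fun _ _ => 0) = tabN N.toNat (rv M N) (hCol M N 0) := by
    apply tabN_congr
    intro i j hi hj
    constructor
    · unfold hRow
      split_ifs <;> first | rfl | omega
    · unfold hCol
      split_ifs <;> first | rfl | omega
  rw [h1, outerB2 M N (rv M N) N.toNat 0 le_rfl (by omega) (by omega)]
  apply tabN_congr
  intro i j hi hj
  refine ⟨rfl, ?_⟩
  unfold hCol
  split_ifs <;> first | rfl | omega

lemma A_nil (M : List (List Int)) (N : Int) (hN : N ≤ 0) : get_memo M N = [] := by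
  unfold get_memo
  rw [PySem.List.pyRange_neg_one_eq_nil (show N - 1 ≤ (-1 : Int) by omega)]
  simp only [List.foldl_nil]
  unfold pvInit
  rw [PySem.List.pyRange_one_eq_nil (show N ≤ (0 : Int) by omega)]
  rfl

lemma B_nil (M : List (List Int)) (N : Int) (hN : N ≤ 0) : get_memo_alt M N = [] := by
  unfold get_memo_alt
  rw [PySem.List.pyRange_one_eq_nil (show N ≤ (0 : Int) by omega)]
  simp only [List.foldl_nil]
  unfold pvInit
  rw [PySem.List.pyRange_one_eq_nil (show N ≤ (0 : Int) by omega)]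
  rfl

-- ===== VERDICT (by name: the statement is the Claim_ definition above) =====
theorem get_memo_spec : Claim_equal_get_memo := by
  unfold Claim_equal_get_memo Spec_get_memo
  intro M N _ _
  by_cases hN : 0 < N
  · rw [A_eq_tab M N hN, B_eq_tab M N hN]
  · rw [A_nil M N (by omega), B_nil M N (by omega)]
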